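-- pv_equiv track=rewrite | github.com/charl-potgieter/AustralianSchoolMaths | WebsiteCreator/file_management.py | _first_non_consecutive_like_item
-- ===== SOURCE A (Python) =====
-- def _first_non_consecutive_like_item(input_values):
--     """Returns first item if it is an item in input_values that equals
--     another item in input_values but they do not appear consecutively,
--     otherwise returns None.
--
--     Args:
--         input_values (iterable): Values to test
--     """
--
--     values_ex_consecutive_duplicates = []
--     for item in input_values:
--         if not values_ex_consecutive_duplicates:
--             values_ex_consecutive_duplicates.append(item)
--         elif item != values_ex_consecutive_duplicates[-1]:
--             values_ex_consecutive_duplicates.append(item)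
--             if values_ex_consecutive_duplicates.count(item) != 1:
--                 return item
--     return None
-- ===== SOURCE B (Python) =====
-- def _first_non_consecutive_like_item(input_values):
--     """Two-phase version: first collapse consecutive duplicates, then scan
--     the collapsed list with a seen-list for the first repeated key."""
--     collapsed = []
--     for item in input_values:
--         if not collapsed or collapsed[-1] != item:
--             collapsed.append(item)
--     seen = []
--     for key in collapsed:
--         if key in seen:
--             return key
--         seen.append(key)
--     return None
-- ===== Notes on version B (the rewrite author's own statement) =====
-- stated objective: simpler
-- what changed: A's single interleaved collapse-and-check loop (which counts occurrences in the growing collapsed list on every append) is split into two sequential passes: one pass removing consecutive duplicates, then a separate seen-list scan returning the first repeated key.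
import Mathlib
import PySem

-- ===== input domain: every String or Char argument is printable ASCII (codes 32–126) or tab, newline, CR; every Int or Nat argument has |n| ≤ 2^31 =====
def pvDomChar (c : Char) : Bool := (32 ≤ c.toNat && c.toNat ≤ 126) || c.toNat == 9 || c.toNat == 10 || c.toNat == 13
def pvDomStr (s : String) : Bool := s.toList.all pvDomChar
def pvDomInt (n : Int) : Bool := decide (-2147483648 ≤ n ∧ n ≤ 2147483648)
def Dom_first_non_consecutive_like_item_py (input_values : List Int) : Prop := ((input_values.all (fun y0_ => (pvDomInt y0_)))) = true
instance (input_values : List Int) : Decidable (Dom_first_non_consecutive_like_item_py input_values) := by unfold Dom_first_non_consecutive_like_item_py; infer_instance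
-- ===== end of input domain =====

-- B replaces A's single interleaved collapse-and-count loop by two sequential passes
-- (collapse consecutive duplicates, then a seen-list scan); objective: simpler.

-- ===== PORT A =====
-- A's loop: state is the collapsed-so-far list; on appending an item different from
-- the last, return it immediately if its count in the new list is not 1.
def pvALoop : List Int → List Int → Option Int
  | [], _ => none
  | item :: rest, acc =>
    if acc = [] then pvALoop rest (acc ++ [item])
    else if item ≠ acc.getLast! then
      let acc' := acc ++ [item]
      if acc'.count item ≠ 1 then some item else pvALoop rest acc'
    else pvALoop rest acc

def first_non_consecutive_like_item_py (input_values : List Int) : Option Int :=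
  pvALoop input_values []

-- ===== PORT B =====
-- phase 1: remove consecutive duplicates
def pvCollapse : List Int → List Int → List Int
  | [], collapsed => collapsed
  | item :: rest, collapsed =>
    if collapsed = [] ∨ collapsed.getLast! ≠ item then pvCollapse rest (collapsed ++ [item])
    else pvCollapse rest collapsed

-- phase 2: seen-list scan for the first repeated key
def pvScan : List Int → List Int → Option Int
  | [], _ => none
  | key :: rest, seen => if key ∈ seen then some key else pvScan rest (seen ++ [key])

def first_non_consecutive_like_item_py_alt (input_values : List Int) : Option Int :=
  pvScan (pvCollapse input_values []) []

-- ===== PRECONDITION & SPEC =====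
def Spec_first_non_consecutive_like_item_py (input_values : List Int) (out : Option Int) : Prop := out = first_non_consecutive_like_item_py_alt input_values
instance (input_values : List Int) (out : Option Int) : Decidable (Spec_first_non_consecutive_like_item_py input_values out) := by unfold Spec_first_non_consecutive_like_item_py; infer_instance

-- ===== CLAIM (what is proved, stated in full; the proofs are below) =====
def Claim_equal_first_non_consecutive_like_item_py : Prop := ∀ (input_values : List Int), Dom_first_non_consecutive_like_item_py input_values → Spec_first_non_consecutive_like_item_py input_values (first_non_consecutive_like_item_py input_values)

-- ===== LEMMAS AND PROOFS =====

theorem getLast?_eq_some_getLast! (acc : List Int) (h : acc ≠ []) : acc.getLast? = some acc.getLast! := by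
  cases acc with
  | nil => exact absurd rfl h
  | cons a as =>
    simp [List.getLast!, List.getLast?_eq_some_getLast (l := a :: as) (by simp)]

-- collapse of the remaining input relative to the (optional) last collapsed value
def pvC : Option Int → List Int → List Int
  | _, [] => []
  | last, x :: rest => if some x = last then pvC last rest else x :: pvC (some x) rest

theorem pvC_skip {x : Int} {last : Option Int} (r : List Int) (h : some x = last) :
    pvC last (x :: r) = pvC last r := by
  simp only [pvC, if_pos h]

theorem pvC_keep {x : Int} {last : Option Int} (r : List Int) (h : ¬ some x = last) :
    pvC last (x :: r) = x :: pvC (some x) r := by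
  simp only [pvC, if_neg h]

theorem pvCollapse_eq (xs : List Int) : ∀ acc, pvCollapse xs acc = acc ++ pvC acc.getLast? xs := by
  induction xs with
  | nil => intro acc; simp [pvCollapse, pvC]
  | cons x rest ih =>
    intro acc
    by_cases hacc : acc = []
    · subst hacc
      rw [show pvCollapse (x :: rest) [] = pvCollapse rest [x] from by
          simp only [pvCollapse]; rw [if_pos (Or.inl trivial), List.nil_append],
        ih [x], pvC_keep rest (by simp)]
      rfl
    · have hlast : acc.getLast? = some acc.getLast! := getLast?_eq_some_getLast! acc hacc
      by_cases hx : acc.getLast! = x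
      · rw [show pvCollapse (x :: rest) acc = pvCollapse rest acc from by
            simp only [pvCollapse]
            rw [if_neg (by push Not; exact ⟨hacc, hx⟩)],
          ih acc, pvC_skip rest (by rw [hlast, hx])]
      · rw [show pvCollapse (x :: rest) acc = pvCollapse rest (acc ++ [x]) from by
            simp only [pvCollapse]
            rw [if_pos (Or.inr hx)],
          ih (acc ++ [x]),
          pvC_keep rest (by rw [hlast]; exact fun h => hx (Option.some.inj h).symm)]
        simp

theorem pvALoop_eq (xs : List Int) : ∀ acc, acc.Nodup → pvALoop xs acc = pvScan (pvC acc.getLast? xs) acc := by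
  induction xs with
  | nil => intro acc _; simp [pvALoop, pvC, pvScan]
  | cons x rest ih =>
    intro acc hnd
    by_cases hacc : acc = []
    · subst hacc
      rw [show pvALoop (x :: rest) [] = pvALoop rest [x] from by
          simp only [pvALoop]; rw [if_pos trivial, List.nil_append],
        ih [x] (List.nodup_singleton x), pvC_keep rest (by simp)]
      simp [pvScan]
    · have hlast : acc.getLast? = some acc.getLast! := getLast?_eq_some_getLast! acc hacc
      by_cases hx : x = acc.getLast!
      · rw [show pvALoop (x :: rest) acc = pvALoop rest acc from by
            simp only [pvALoop]
            rw [if_neg hacc, if_neg (not_not_intro hx)],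
          ih acc hnd, pvC_skip rest (by rw [hlast, hx])]
      · rw [pvC_keep rest (by rw [hlast]; exact fun h => hx (Option.some.inj h))]
        by_cases hmem : x ∈ acc
        · have hcnt : (acc ++ [x]).count x ≠ 1 := by
            have := List.count_pos_iff.mpr hmem
            simp [List.count_append]
            omega
          rw [show pvALoop (x :: rest) acc = some x from by
            simp only [pvALoop]
            rw [if_neg hacc, if_pos hx, if_pos hcnt]]
          simp [pvScan, hmem]
        · have hcnt : ¬ (acc ++ [x]).count x ≠ 1 := by
            simp [List.count_append, List.count_eq_zero.mpr hmem]
          have hnd' : (acc ++ [x]).Nodup := by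
            simp [List.nodup_append, hnd]
            exact fun a ha hax => hmem (hax ▸ ha)
          rw [show pvALoop (x :: rest) acc = pvALoop rest (acc ++ [x]) from by
            simp only [pvALoop]
            rw [if_neg hacc, if_pos hx, if_neg hcnt],
          ih (acc ++ [x]) hnd', show (acc ++ [x]).getLast? = some x from by simp,
          show pvScan (x :: pvC (some x) rest) acc = pvScan (pvC (some x) rest) (acc ++ [x]) from by
            simp only [pvScan]; rw [if_neg hmem]]

-- ===== VERDICT (by name: the statement is the Claim_ definition above) =====
theorem first_non_consecutive_like_item_py_spec : Claim_equal_first_non_consecutive_like_item_py := by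
  intro xs _
  unfold Spec_first_non_consecutive_like_item_py first_non_consecutive_like_item_py first_non_consecutive_like_item_py_alt
  rw [pvALoop_eq xs [] List.nodup_nil, pvCollapse_eq xs []]
  rfl
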